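-- pv_equiv track=rewrite | github.com/KavishRamdassWork/HFrameQuoteTool_Demo | H-Frame Quote Tool Demo.py | replace_first_l_with_numbers
-- ===== SOURCE A (Python) =====
-- def replace_first_l_with_numbers(input_str, replacement_numbers):
--     count = 0
--     result = ''
--
--     for char in input_str:
--         if char == 'L':
--             count += 1
--             if count == 1:
--                 result += str(replacement_numbers)  # Replace 'L' with the desired numbers
--             else:
--                 result += char
--         else:
--             result += char
--
--     return result
-- ===== SOURCE B (Python) =====
-- def replace_first_l_with_numbers(input_str, replacement_numbers):
--     idx = input_str.find('L')
--     if idx == -1: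
--         return input_str
--     return input_str[:idx] + str(replacement_numbers) + input_str[idx + 1:]
-- ===== Notes on version B (the rewrite author's own statement) =====
-- stated objective: simpler
-- what changed: Replaces the character-by-character loop with its count/result accumulators by a single locate-then-splice: find the first 'L' and rebuild with two slices around str(replacement_numbers); avoids repeated string concatenation.
import Mathlib
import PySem

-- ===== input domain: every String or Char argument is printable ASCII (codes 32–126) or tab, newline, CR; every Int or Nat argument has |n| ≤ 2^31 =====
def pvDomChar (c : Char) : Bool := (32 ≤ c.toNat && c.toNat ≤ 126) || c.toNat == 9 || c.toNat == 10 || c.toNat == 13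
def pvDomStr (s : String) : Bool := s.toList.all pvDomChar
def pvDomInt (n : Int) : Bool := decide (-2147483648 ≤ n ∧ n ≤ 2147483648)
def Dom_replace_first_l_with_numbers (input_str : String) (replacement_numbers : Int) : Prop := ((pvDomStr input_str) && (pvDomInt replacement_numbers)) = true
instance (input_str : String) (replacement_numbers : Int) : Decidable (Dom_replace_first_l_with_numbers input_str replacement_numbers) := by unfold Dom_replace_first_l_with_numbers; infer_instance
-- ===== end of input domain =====

-- B replaces A's char-by-char loop (count + output buffer) with a single find-then-splice; objective: simpler.


-- ===== PORT A =====
-- A's loop body: state is (count, result); result kept as List Char (Python string concatenation).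
def pvStepA (replacement_numbers : Int) (st : Int × List Char) (char : Char) : Int × List Char :=
  if char = 'L' then
    let count := st.1 + 1
    if count = 1 then (count, st.2 ++ PySem.Int.toChars replacement_numbers)
    else (count, st.2 ++ [char])
  else (st.1, st.2 ++ [char])

def replace_first_l_with_numbers (input_str : String) (replacement_numbers : Int) : String :=
  String.ofList (input_str.toList.foldl (pvStepA replacement_numbers) (0, [])).2

-- ===== PORT B =====
def replace_first_l_with_numbers_alt (input_str : String) (replacement_numbers : Int) : String :=
  let idx := PySem.Str.find input_str "L"
  if idx = -1 then input_str
  else String.ofList (PySem.List.slice input_str.toList none (some idx)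
        ++ PySem.Int.toChars replacement_numbers
        ++ PySem.List.slice input_str.toList (some (idx + 1)) none)

-- ===== PRECONDITION & SPEC =====
def Spec_replace_first_l_with_numbers (input_str : String) (replacement_numbers : Int) (out : String) : Prop := out = replace_first_l_with_numbers_alt input_str replacement_numbers
instance (input_str : String) (replacement_numbers : Int) (out : String) : Decidable (Spec_replace_first_l_with_numbers input_str replacement_numbers out) := by unfold Spec_replace_first_l_with_numbers; infer_instance

-- ===== CLAIM (what is proved, stated in full; the proofs are below) =====
def Claim_equal_replace_first_l_with_numbers : Prop := ∀ (input_str : String) (replacement_numbers : Int), Dom_replace_first_l_with_numbers input_str replacement_numbers → Spec_replace_first_l_with_numbers input_str replacement_numbers (replace_first_l_with_numbers input_str replacement_numbers)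

-- ===== LEMMAS AND PROOFS =====

-- once A's counter is positive, the loop just copies the rest of the string
theorem pvFoldA_pos (n : Int) (cs : List Char) : ∀ (c : Int) (r : List Char), 0 < c →
    (List.foldl (pvStepA n) (c, r) cs).2 = r ++ cs := by
  induction cs with
  | nil => intro c r _; simp
  | cons x xs ih =>
    intro c r hc
    by_cases hx : x = 'L'
    · subst hx
      have hstep : pvStepA n (c, r) 'L' = (c + 1, r ++ ['L']) := by
        unfold pvStepA
        rw [if_pos rfl, if_neg (show ¬((c : Int) + 1 = 1) by omega)]
      rw [List.foldl_cons, hstep, ih _ _ (by omega)]; simp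
    · have hstep : pvStepA n (c, r) x = (c, r ++ [x]) := by
        unfold pvStepA; rw [if_neg hx]
      rw [List.foldl_cons, hstep, ih _ _ hc]; simp

-- while no 'L' has been seen, the loop copies characters and keeps count 0
theorem pvFoldA_noL (n : Int) (cs : List Char) : ∀ (r : List Char), 'L' ∉ cs →
    List.foldl (pvStepA n) (0, r) cs = (0, r ++ cs) := by
  induction cs with
  | nil => intro r _; simp
  | cons x xs ih =>
    intro r h
    have hx : x ≠ 'L' := fun hh => h (hh ▸ List.mem_cons_self)
    have hxs : 'L' ∉ xs := fun hh => h (List.mem_cons_of_mem _ hh)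
    have hstep : pvStepA n (0, r) x = (0, r ++ [x]) := by
      simp only [pvStepA, if_neg hx]
    rw [List.foldl_cons, hstep, ih _ hxs]; simp

-- full shape of A's result on (L-free prefix) ++ 'L' :: rest
theorem pvFoldA_split (n : Int) (t rest : List Char) (ht : 'L' ∉ t) :
    (List.foldl (pvStepA n) (0, []) (t ++ 'L' :: rest)).2
      = t ++ PySem.Int.toChars n ++ rest := by
  rw [List.foldl_append, pvFoldA_noL n t [] ht]
  have : pvStepA n (0, [] ++ t) 'L' = (1, t ++ PySem.Int.toChars n) := by
    simp [pvStepA]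
  rw [List.foldl_cons, this, pvFoldA_pos n rest 1 _ (by omega)]

theorem pvSingletonPrefix (a : Char) (l : List Char) : [a] <+: l ↔ l.head? = some a := by
  cases l with
  | nil => simp
  | cons x xs =>
    constructor
    · rintro ⟨t, ht⟩
      simp only [List.cons_append, List.nil_append, List.cons.injEq] at ht
      simp [ht.1]
    · intro h; simp only [List.head?_cons, Option.some.injEq] at h
      exact ⟨xs, by simp [h]⟩

-- ===== VERDICT (by name: the statement is the Claim_ definition above) =====
theorem replace_first_l_with_numbers_spec : Claim_equal_replace_first_l_with_numbers := by
  intro input_str n _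
  unfold Spec_replace_first_l_with_numbers replace_first_l_with_numbers replace_first_l_with_numbers_alt
  set cs := input_str.toList with hcs
  have hfind : PySem.Str.find input_str "L" = PySem.Chars.find cs ['L'] := by
    simp [PySem.Str.find, hcs]
  by_cases h : PySem.Str.find input_str "L" = -1
  · -- no 'L' in the string: A copies it unchanged, B returns it unchanged
    rw [if_pos h]
    have hnin : 'L' ∉ cs := by
      have hni := (PySem.Str.find_eq_neg_one_iff input_str "L").mp h
      intro hmem
      exact hni ((List.singleton_infix_iff 'L' cs).mpr hmem)
    rw [pvFoldA_noL n cs [] hnin]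
    simp [hcs]
  · rw [if_neg h]
    have h0 : 0 ≤ PySem.Chars.find cs ['L'] := by
      have := PySem.Chars.neg_one_le_find cs ['L']
      rw [hfind] at h; omega
    obtain ⟨hpre, hmin⟩ := PySem.Chars.find_spec h0
    set k := (PySem.Chars.find cs ['L']).toNat with hk
    have hhead : cs[k]? = some 'L' := by
      rw [← List.head?_drop]; exact (pvSingletonPrefix 'L' _).mp hpre
    have hklt : k < cs.length := by
      rcases List.getElem?_eq_some_iff.mp hhead with ⟨hlt, _⟩; exact hlt
    have hgetk : cs[k]'hklt = 'L' := by
      have h2 := hhead; rw [List.getElem?_eq_getElem hklt] at h2; simpa using h2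
    have hdec : cs = cs.take k ++ 'L' :: cs.drop (k + 1) := by
      conv_lhs => rw [← List.take_append_drop k cs]
      rw [← List.getElem_cons_drop hklt, hgetk]
    have hnint : 'L' ∉ cs.take k := by
      intro hmem
      obtain ⟨i, hi, hgi⟩ := List.mem_iff_getElem.mp hmem
      have hik : i < k := lt_of_lt_of_le hi (by simp [List.length_take])
      apply hmin i hik
      rw [pvSingletonPrefix, List.head?_drop]
      rw [List.getElem_take] at hgi
      rw [List.getElem?_eq_getElem (lt_of_lt_of_le hik (le_of_lt hklt)), hgi]
    -- slices
    have hs1 : PySem.List.slice cs none (some (PySem.Str.find input_str "L")) = cs.take k := by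
      rw [hfind, PySem.List.slice_to cs h0, hk]
    have hs2 : PySem.List.slice cs (some (PySem.Str.find input_str "L" + 1)) none = cs.drop (k + 1) := by
      rw [hfind, PySem.List.slice_from cs (by omega), hk]
      congr 1; omega
    rw [hs1, hs2]
    conv_lhs => rw [hdec]
    rw [pvFoldA_split n _ _ hnint]
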